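-- pv_equiv track=rewrite | github.com/hvines/Cripto-y-Seguridad-en-Redes | Lab 1/pcap_native_decoder.py | contar_palabras_validas
-- ===== SOURCE A (Python) =====
-- def contar_palabras_validas(texto):
--     palabras_validas = {
--         'criptografia', 'seguridad', 'redes', 'en', 'y'
--     }
--
--     palabras = texto.lower().split()
--     contador = 0
--     for palabra in palabras:
--         palabra_limpia = ''.join(c for c in palabra if c.isalpha())
--         if palabra_limpia in palabras_validas:
--             contador += 1
--     return contador
-- ===== SOURCE B (Python) =====
-- def contar_palabras_validas(texto):
--     palabras_validas = ('criptografia', 'seguridad', 'redes', 'en', 'y')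
--     counts = {}
--     for palabra in texto.lower().split():
--         limpia = ''.join(c for c in palabra if c.isalpha())
--         counts[limpia] = counts.get(limpia, 0) + 1
--     return sum(counts.get(w, 0) for w in palabras_validas)
-- ===== Notes on version B (the rewrite author's own statement) =====
-- stated objective: idiomatic
-- what changed: B builds a frequency table of the cleaned words in one pass and then sums the counts of the five valid words, inverting A's per-word membership-test loop into a lookup over the valid set.
import Mathlib
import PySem

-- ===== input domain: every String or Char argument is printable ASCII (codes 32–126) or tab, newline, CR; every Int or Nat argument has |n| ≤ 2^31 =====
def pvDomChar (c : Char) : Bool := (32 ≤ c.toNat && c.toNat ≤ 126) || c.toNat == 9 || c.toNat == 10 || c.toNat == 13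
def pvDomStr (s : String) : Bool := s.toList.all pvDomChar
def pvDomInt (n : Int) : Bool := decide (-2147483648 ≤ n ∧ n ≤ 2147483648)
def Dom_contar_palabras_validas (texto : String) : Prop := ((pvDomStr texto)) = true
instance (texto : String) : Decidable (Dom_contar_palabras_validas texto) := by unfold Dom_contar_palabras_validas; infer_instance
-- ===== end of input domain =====

-- B builds a frequency table of cleaned words once and sums the counts of the
-- five valid words, instead of testing each text word against the set (idiomatic).


-- ===== PORT A =====
def contar_palabras_validas (texto : String) : Int :=
  let palabras_validas : PySem.Set String :=
    PySem.Set.ofList ["criptografia", "seguridad", "redes", "en", "y"]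
  let palabras := PySem.Str.split₀ (PySem.Str.lower texto)
  palabras.foldl (fun contador palabra =>
    let palabra_limpia := String.mk (palabra.toList.filter PySem.Chars.isalpha)
    if PySem.Set.contains palabras_validas palabra_limpia then contador + 1 else contador) 0

-- ===== PORT B =====
def contar_palabras_validas_alt (texto : String) : Int :=
  let counts : PySem.Dict String Int :=
    (PySem.Str.split₀ (PySem.Str.lower texto)).foldl (fun d palabra =>
      let limpia := String.mk (palabra.toList.filter PySem.Chars.isalpha)
      d.insert limpia (d.getD limpia 0 + 1)) PySem.Dict.empty
  ["criptografia", "seguridad", "redes", "en", "y"].foldl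
    (fun acc w => acc + counts.getD w 0) 0

-- ===== PRECONDITION & SPEC =====
def Spec_contar_palabras_validas (texto : String) (out : Int) : Prop := out = contar_palabras_validas_alt texto
instance (texto : String) (out : Int) : Decidable (Spec_contar_palabras_validas texto out) := by unfold Spec_contar_palabras_validas; infer_instance

-- ===== CLAIM (what is proved, stated in full; the proofs are below) =====
def Claim_equal_contar_palabras_validas : Prop := ∀ (texto : String), Dom_contar_palabras_validas texto → Spec_contar_palabras_validas texto (contar_palabras_validas texto)

-- ===== LEMMAS AND PROOFS =====

-- one cleaned word's contribution: membership indicator = sum of equality indicators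
theorem pv_indicator (x : String) :
    (if PySem.Set.contains
        (PySem.Set.ofList ["criptografia", "seguridad", "redes", "en", "y"]) x
      then (1 : Int) else 0)
    = (if x = "criptografia" then (1 : Int) else 0) + (if x = "seguridad" then 1 else 0)
      + (if x = "redes" then 1 else 0) + (if x = "en" then 1 else 0)
      + (if x = "y" then 1 else 0) := by
  by_cases h1 : x = "criptografia" <;> by_cases h2 : x = "seguridad" <;>
    by_cases h3 : x = "redes" <;> by_cases h4 : x = "en" <;> by_cases h5 : x = "y" <;>
    simp_all [PySem.Set.contains, PySem.Set.ofList]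

-- A's membership-count loop equals the sum of the five counts of the cleaned words
theorem pv_fold_eq_counts (f : String → String) (l : List String) (n : Int) :
    l.foldl (fun contador p =>
      if PySem.Set.contains
          (PySem.Set.ofList ["criptografia", "seguridad", "redes", "en", "y"]) (f p)
        then contador + 1 else contador) n
    = n + ((l.map f).count "criptografia" : Int) + ((l.map f).count "seguridad" : Int)
        + ((l.map f).count "redes" : Int) + ((l.map f).count "en" : Int)
        + ((l.map f).count "y" : Int) := by
  induction l generalizing n with
  | nil => simp
  | cons x t ih =>
    have hx := pv_indicator (f x)
    simp only [List.foldl_cons, ih, List.map_cons, List.count_cons]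
    by_cases h1 : f x = "criptografia" <;> by_cases h2 : f x = "seguridad" <;>
      by_cases h3 : f x = "redes" <;> by_cases h4 : f x = "en" <;> by_cases h5 : f x = "y" <;>
      simp_all <;> ring

-- B's table lookup is the count of the cleaned-word list
theorem pv_getD_eq_count (f : String → String) (l : List String) (w : String) :
    (l.foldl (fun d p => d.insert (f p) (d.getD (f p) 0 + 1))
        (PySem.Dict.empty : PySem.Dict String Int)).getD w 0
    = ((l.map f).count w : Int) := by
  rw [← List.foldl_map (f := f) (g := fun (d : PySem.Dict String Int) x => d.insert x (d.getD x 0 + 1))]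
  rw [PySem.Dict.getD_foldl_insert_add_one]
  simp [PySem.Dict.empty, PySem.Dict.getD, PySem.Dict.get?]

-- ===== VERDICT (by name: the statement is the Claim_ definition above) =====
theorem contar_palabras_validas_spec : Claim_equal_contar_palabras_validas := by
  intro texto _
  simp only [Spec_contar_palabras_validas, contar_palabras_validas,
    contar_palabras_validas_alt, List.foldl_cons, List.foldl_nil]
  rw [pv_fold_eq_counts (fun p => String.mk (p.toList.filter PySem.Chars.isalpha)),
    pv_getD_eq_count, pv_getD_eq_count, pv_getD_eq_count, pv_getD_eq_count, pv_getD_eq_count]
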